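-- pv_equiv track=rewrite | github.com/mozilla/bugbot | auto_nag/scripts/no_assignee.py | clean_name
-- ===== SOURCE A (Python) =====
-- def clean_name(name):
--     """Get the different parts of the name with letters only
--     """
--     res = ''
--     for c in name:
--         res += c if c.isalpha() else ' '
--     res = res.split(' ')
--     res = filter(None, res)
--     res = map(lambda s: s.lower(), res)
--     res = set(res)
--
--     if len(res) >= 2:
--         return res
--
--     return set()
-- ===== SOURCE B (Python) =====
-- def clean_name(name):
--     # Single pass with an explicit accumulator state machine: lowercase each
--     # letter as it is seen, flush the current word into the set at each
--     # non-letter boundary (and once at the end); gate on >= 2 words.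
--     res = set()
--     cur = []
--     for c in name:
--         if c.isalpha():
--             cur.append(c.lower())
--         elif cur:
--             res.add(''.join(cur))
--             cur = []
--     if cur:
--         res.add(''.join(cur))
--     return res if len(res) >= 2 else set()
-- ===== Notes on version B (the rewrite author's own statement) =====
-- stated objective: alternative
-- what changed: Replaced A's staged pipeline (build a space-masked copy of the string, then split/filter/map/set) with a single-pass state machine that keeps the current word as an accumulator of already-lowercased characters and flushes it into the set at each non-letter boundary.
import Mathlib
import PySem

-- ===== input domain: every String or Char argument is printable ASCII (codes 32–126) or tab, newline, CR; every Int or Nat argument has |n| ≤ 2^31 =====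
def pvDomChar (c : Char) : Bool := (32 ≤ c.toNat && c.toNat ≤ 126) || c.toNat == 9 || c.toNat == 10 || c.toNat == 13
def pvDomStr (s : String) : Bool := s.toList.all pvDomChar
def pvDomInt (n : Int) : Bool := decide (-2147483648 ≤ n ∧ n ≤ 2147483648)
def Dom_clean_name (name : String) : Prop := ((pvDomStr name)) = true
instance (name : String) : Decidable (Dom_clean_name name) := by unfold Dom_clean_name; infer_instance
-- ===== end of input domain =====

-- B replaces A's staged masked-copy/split/filter/map pipeline by a single-pass state machine
-- with a current-word accumulator flushed into the set at non-letter boundaries (alternative; return value only).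

-- ===== PORT A =====
-- A: build a copy of the string with non-letters replaced by ' ', split on ' ',
-- drop empty pieces, lowercase, collect into a set; return it only if it has ≥ 2 elements.
def clean_name (name : String) : List String :=
  let res : List Char :=
    name.toList.foldl (fun acc c => acc ++ [if PySem.Chars.isalpha c then c else ' ']) []
  let parts := PySem.Chars.splitOn res [' ']
  let parts := parts.filter (fun s => decide (s ≠ []))
  let lowered := parts.map (fun s => String.mk (PySem.Chars.lower s))
  let st : PySem.Set String := PySem.Set.ofList lowered
  if 2 ≤ PySem.Set.len st then st else []

-- ===== PORT B =====
-- B-side helper: the single pass over the characters, carrying the current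
-- (already lowercased) word 'cur' and the set 'res' built so far; a non-letter
-- flushes a non-empty 'cur' into 'res', the end of the string flushes once more.
def cleanGo (l : List Char) (cur : List Char) (res : PySem.Set String) : PySem.Set String :=
  match l with
  | [] => if cur = [] then res else PySem.Set.add res (String.mk cur)
  | c :: t =>
    if PySem.Chars.isalpha c then cleanGo t (cur ++ [PySem.Chars.lowerChar c]) res
    else if cur = [] then cleanGo t [] res
    else cleanGo t [] (PySem.Set.add res (String.mk cur))

def clean_name_alt (name : String) : List String :=
  let res := cleanGo name.toList [] []
  if 2 ≤ PySem.Set.len res then res else []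

-- ===== PRECONDITION & SPEC =====
def Spec_clean_name (name : String) (out : List String) : Prop := out = clean_name_alt name
instance (name : String) (out : List String) : Decidable (Spec_clean_name name out) := by unfold Spec_clean_name; infer_instance

-- ===== CLAIM (what is proved, stated in full; the proofs are below) =====
def Claim_equal_clean_name : Prop := ∀ (name : String), Dom_clean_name name → Spec_clean_name name (clean_name name)

-- ===== LEMMAS AND PROOFS =====

-- the maximal alphabetic runs of a character list, in order
def alphaRuns (l : List Char) : List (List Char) :=
  match l with
  | [] => []
  | c :: rest =>
    if PySem.Chars.isalpha c then
      (c :: rest.takeWhile PySem.Chars.isalpha) :: alphaRuns (rest.dropWhile PySem.Chars.isalpha)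
    else
      alphaRuns rest
termination_by l.length
decreasing_by
  · simpa using Nat.lt_succ_of_le (List.length_dropWhile_le _ _)
  · simp

-- the lowercased runs as strings
def lowRuns (l : List Char) : List String :=
  (alphaRuns l).map (fun g => String.mk (PySem.Chars.lower g))

-- mask: what A's first loop does to one character
def pvMask (c : Char) : Char := if PySem.Chars.isalpha c then c else ' '

-- simple recursive model of str.split(' ')
def splitSp : List Char → List (List Char)
  | [] => [[]]
  | c :: t => if c = ' ' then [] :: splitSp t else (splitSp t).modifyHead (c :: ·)

lemma foldl_mask (l : List Char) (acc : List Char) :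
    l.foldl (fun acc c => acc ++ [if PySem.Chars.isalpha c then c else ' ']) acc
      = acc ++ l.map pvMask := by
  induction l generalizing acc with
  | nil => simp
  | cons c t ih => simp [ih, pvMask]

lemma go_splitSp (fuel : Nat) (s : List Char) (h : s.length < fuel)
    (cur : List Char) (acc : List (List Char)) :
    PySem.Chars.splitOn.go [' '] fuel s cur acc
      = acc.reverse ++ (splitSp s).modifyHead (cur.reverse ++ ·) := by
  induction fuel generalizing s cur acc with
  | zero => omega
  | succ f ih =>
    cases s with
    | nil => simp [PySem.Chars.splitOn.go, splitSp]
    | cons c rest =>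
      by_cases hc : c = ' '
      · subst hc
        have : ([' '].isPrefixOf (' ' :: rest)) = true := by simp [List.isPrefixOf]
        rw [PySem.Chars.splitOn.go]
        simp only [this, if_pos]
        have hdrop : List.drop [' '].length (' ' :: rest) = rest := rfl
        rw [hdrop, ih rest (by simpa using Nat.lt_of_succ_lt_succ h)]
        cases hs : splitSp rest with
        | nil => simp [splitSp, hs]
        | cons a b => simp [splitSp, hs]
      · have : ([' '].isPrefixOf (c :: rest)) = false := by
          simp [List.isPrefixOf]; exact fun hh => absurd hh.symm hc
        rw [PySem.Chars.splitOn.go]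
        simp only [this, Bool.false_eq_true, if_false]
        rw [ih rest (by simpa using Nat.lt_of_succ_lt_succ h)]
        cases hs : splitSp rest with
        | nil => simp [splitSp, hs, hc]
        | cons a b => simp [splitSp, hs, hc]

lemma splitOn_eq_splitSp (s : List Char) :
    PySem.Chars.splitOn s [' '] = splitSp s := by
  rw [PySem.Chars.splitOn, go_splitSp (s.length + 1) s (by omega)]
  cases hs : splitSp s with
  | nil => simp
  | cons a b => simp

lemma isalpha_space : PySem.Chars.isalpha ' ' = false := by decide

-- runs restated through takeWhile/dropWhile at the top level
lemma alphaRuns_take_drop (l : List Char) :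
    alphaRuns l
      = (if l.takeWhile PySem.Chars.isalpha = [] then []
          else [l.takeWhile PySem.Chars.isalpha]) ++ alphaRuns (l.dropWhile PySem.Chars.isalpha) := by
  cases l with
  | nil => simp [alphaRuns]
  | cons c rest =>
    by_cases hc : PySem.Chars.isalpha c = true
    · rw [alphaRuns]; simp [hc]
    · have hcr : alphaRuns (c :: rest) = alphaRuns rest := by rw [alphaRuns]; simp [hc]
      simp [hc, hcr]

-- head and filtered tail of splitSp over the masked string
lemma splitSp_mask (l : List Char) :
    (splitSp (l.map pvMask)).head? = some (l.takeWhile PySem.Chars.isalpha)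
    ∧ (splitSp (l.map pvMask)).tail.filter (fun p => decide (p ≠ []))
        = alphaRuns (l.dropWhile PySem.Chars.isalpha) := by
  induction l with
  | nil => simp [splitSp, alphaRuns]
  | cons c rest ih =>
    obtain ⟨ih1, ih2⟩ := ih
    by_cases hc : PySem.Chars.isalpha c = true
    · have hcs : c ≠ ' ' := by
        intro h; rw [h] at hc; exact absurd hc (by simp [isalpha_space])
      have hmask : pvMask c = c := by simp [pvMask, hc]
      cases hs : splitSp (rest.map pvMask) with
      | nil => rw [hs] at ih1; simp at ih1
      | cons a b =>
        rw [hs] at ih1 ih2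
        simp only [List.head?_cons, Option.some.injEq] at ih1
        constructor
        · simp [splitSp, hmask, hcs, hs, hc, ih1]
        · simpa [splitSp, hmask, hcs, hs, List.dropWhile_cons, hc] using ih2
    · have hmask : pvMask c = ' ' := by simp [pvMask, hc]
      constructor
      · simp [splitSp, hmask, hc]
      · cases hs : splitSp (rest.map pvMask) with
        | nil => rw [hs] at ih1; simp at ih1
        | cons a b =>
          rw [hs] at ih1 ih2
          simp only [List.head?_cons, Option.some.injEq] at ih1
          simp only [List.tail_cons] at ih2
          have : (splitSp ((c :: rest).map pvMask)).tail = a :: b := by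
            simp [splitSp, hmask, hs]
          rw [this, List.dropWhile_cons]
          simp only [hc, Bool.false_eq_true, if_false]
          have hcr : alphaRuns (c :: rest) = alphaRuns rest := by rw [alphaRuns]; simp [hc]
          rw [hcr, alphaRuns_take_drop rest]
          subst ih1
          by_cases ha : rest.takeWhile PySem.Chars.isalpha = []
          · simpa [ha] using ih2
          · simpa [ha] using ih2

lemma filter_splitSp_mask (l : List Char) :
    (splitSp (l.map pvMask)).filter (fun p => decide (p ≠ [])) = alphaRuns l := by
  obtain ⟨h1, h2⟩ := splitSp_mask l
  cases hs : splitSp (l.map pvMask) with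
  | nil => rw [hs] at h1; simp at h1
  | cons a b =>
    rw [hs] at h1 h2
    simp only [List.head?_cons, Option.some.injEq] at h1
    simp only [List.tail_cons] at h2
    rw [List.filter_cons, alphaRuns_take_drop l, ← h1, h2]
    by_cases ha : a = [] <;> simp [ha]

-- A's set, characterised: the lowered runs collected in first-occurrence order
lemma clean_name_eq_lowRuns (name : String) :
    clean_name name
      = (if 2 ≤ PySem.Set.len (PySem.Set.ofList (lowRuns name.toList))
          then PySem.Set.ofList (lowRuns name.toList) else []) := by
  simp only [clean_name, lowRuns, foldl_mask, List.nil_append, splitOn_eq_splitSp,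
    filter_splitSp_mask]

lemma lower_cons (c : Char) (l : List Char) :
    PySem.Chars.lower (c :: l) = PySem.Chars.lowerChar c :: PySem.Chars.lower l := rfl

-- what B's pass emits from state 'cur' on the remaining input
def glue (cur : List Char) (l : List Char) : List String :=
  if cur = [] then lowRuns l
  else String.mk (cur ++ PySem.Chars.lower (l.takeWhile PySem.Chars.isalpha))
        :: lowRuns (l.dropWhile PySem.Chars.isalpha)

-- loop invariant of B's single pass
lemma cleanGo_eq_foldl (l : List Char) (cur : List Char) (res : PySem.Set String) :
    cleanGo l cur res = (glue cur l).foldl PySem.Set.add res := by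
  induction l generalizing cur res with
  | nil =>
    by_cases hcur : cur = [] <;>
      simp [cleanGo, glue, hcur, lowRuns, alphaRuns, PySem.Chars.lower]
  | cons c t ih =>
    by_cases hc : PySem.Chars.isalpha c = true
    · have hrun : alphaRuns (c :: t)
          = (c :: t.takeWhile PySem.Chars.isalpha) :: alphaRuns (t.dropWhile PySem.Chars.isalpha) := by
        rw [alphaRuns]; simp [hc]
      by_cases hcur : cur = []
      · subst hcur
        simp only [cleanGo, hc, if_pos, List.nil_append]
        rw [ih]
        simp [glue, lowRuns, hrun, lower_cons]
      · simp only [cleanGo, hc, if_pos]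
        rw [ih]
        simp [glue, hcur, hc, lower_cons,
          List.append_assoc]
    · have hrun : alphaRuns (c :: t) = alphaRuns t := by rw [alphaRuns]; simp [hc]
      by_cases hcur : cur = []
      · subst hcur
        simp only [cleanGo, hc, Bool.false_eq_true, if_false, if_pos]
        rw [ih]
        simp [glue, lowRuns, hrun]
      · simp only [cleanGo, hc, Bool.false_eq_true, if_false, hcur]
        rw [ih]
        simp [glue, hcur, hc, hrun, lowRuns,
          PySem.Chars.lower]

lemma cleanGo_eq_ofList (l : List Char) :
    cleanGo l [] [] = PySem.Set.ofList (lowRuns l) := by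
  rw [cleanGo_eq_foldl]
  simp [glue]
  rfl

-- ===== VERDICT (by name: the statement is the Claim_ definition above) =====
theorem clean_name_spec : Claim_equal_clean_name := by
  intro name _
  show clean_name name = clean_name_alt name
  rw [clean_name_eq_lowRuns]
  simp only [clean_name_alt, cleanGo_eq_ofList]
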